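-- pv_equiv track=rewrite | github.com/mfelleisen/Transformations | llms/leetcode_hard_processed/LeetCode_866_lastSubstring/original.py | lastSubstring
-- ===== SOURCE A (Python) =====
-- def lastSubstring(s: str) -> str:
--     """
--     Given a string s, return the last substring of s in lexicographical order.
--
--     Example 1:
--
--     Input: s = "abab"
--     Output: "bab"
--     Explanation: The substrings are ["a", "ab", "aba", "abab", "b", "ba", "bab"]. The lexicographically maximum substring is "bab".
--
--     Example 2:
--
--     Input: s = "leetcode"
--     Output: "tcode"
--
--
--     Constraints:
--
--     1 <= s.length <= 4 * 105
--     s contains only lowercase English letters.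
--
--     """
--     maxIndex = 0
--     curIndex = 1
--     while curIndex < len(s):
--         i = 0
--         while curIndex + i < len(s) and s[maxIndex + i] == s[curIndex + i]:
--             i += 1
--         if curIndex + i == len(s):
--             break
--         if s[maxIndex + i] < s[curIndex + i]:
--             maxIndex = curIndex
--         curIndex += 1
--     return s[maxIndex:]
-- ===== SOURCE B (Python) =====
-- def lastSubstring(s: str) -> str:
--     # two-pointer maximal-suffix scan: i = best candidate, j = challenger, k = matched length
--     n = len(s)
--     i, j, k = 0, 1, 0
--     while j + k < n:
--         if s[i + k] == s[j + k]:
--             k += 1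
--         elif s[i + k] < s[j + k]:
--             i = max(i + k + 1, j)
--             j = i + 1
--             k = 0
--         else:
--             j = j + k + 1
--             k = 0
--     return s[i:]
-- ===== Notes on version B (the rewrite author's own statement) =====
-- stated objective: faster
-- what changed: A rescans suffix-vs-suffix for every candidate position (O(n^2) worst case); B is the linear two-pointer maximal-suffix scan that keeps a candidate i, a challenger j and a matched length k and jumps whole matched ranges on a mismatch.
import Mathlib
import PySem

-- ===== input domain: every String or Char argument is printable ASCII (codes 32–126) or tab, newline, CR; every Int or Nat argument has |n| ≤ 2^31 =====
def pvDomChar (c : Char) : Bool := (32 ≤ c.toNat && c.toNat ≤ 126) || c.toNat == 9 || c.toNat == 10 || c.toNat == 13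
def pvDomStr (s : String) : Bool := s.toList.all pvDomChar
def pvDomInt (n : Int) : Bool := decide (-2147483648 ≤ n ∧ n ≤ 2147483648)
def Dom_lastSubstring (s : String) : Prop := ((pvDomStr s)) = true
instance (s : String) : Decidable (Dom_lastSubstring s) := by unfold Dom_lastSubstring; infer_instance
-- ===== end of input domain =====

-- B replaces A's quadratic candidate-vs-candidate rescan with the linear two-pointer
-- maximal-suffix scan (candidate i, challenger j, matched length k): objective = faster.

-- ===== PORT A =====
def pvA_inner (cs : List Char) (maxI curI i : Nat) : Nat :=
  if h : curI + i < cs.length ∧ cs.getD (maxI + i) default = cs.getD (curI + i) default then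
    pvA_inner cs maxI curI (i + 1)
  else i
termination_by cs.length - (curI + i)
decreasing_by omega

def pvA_loop (cs : List Char) (maxI curI : Nat) : Nat :=
  if h : curI < cs.length then
    let i := pvA_inner cs maxI curI 0
    if curI + i = cs.length then maxI
    else if cs.getD (maxI + i) default < cs.getD (curI + i) default then
      pvA_loop cs curI (curI + 1)
    else pvA_loop cs maxI (curI + 1)
  else maxI
termination_by cs.length - curI

def lastSubstring (s : String) : String :=
  PySem.Str.slice s (some ((pvA_loop s.toList 0 1 : Nat) : Int)) none

-- ===== PORT B =====
def pvB_loop (cs : List Char) (i j k : Nat) : Nat :=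
  if h : j + k < cs.length then
    if cs.getD (i + k) default = cs.getD (j + k) default then
      pvB_loop cs i j (k + 1)
    else if cs.getD (i + k) default < cs.getD (j + k) default then
      let i' := max (i + k + 1) j
      pvB_loop cs i' (i' + 1) 0
    else
      pvB_loop cs i (j + k + 1) 0
  else i
termination_by (cs.length - j, cs.length - (j + k))
decreasing_by
  · omega
  · omega
  · omega

def lastSubstring_alt (s : String) : String :=
  PySem.Str.slice s (some ((pvB_loop s.toList 0 1 0 : Nat) : Int)) none


-- ===== PRECONDITION & SPEC =====
def Spec_lastSubstring (s : String) (out : String) : Prop := out = lastSubstring_alt s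
instance (s : String) (out : String) : Decidable (Spec_lastSubstring s out) := by unfold Spec_lastSubstring; infer_instance

-- ===== CLAIM (what is proved, stated in full; the proofs are below) =====
def Claim_equal_lastSubstring : Prop := ∀ (s : String), Dom_lastSubstring s → Spec_lastSubstring s (lastSubstring s)

-- ===== LEMMAS AND PROOFS =====

/-- `MatchK l a b k`: the `k` characters starting at `a` and at `b` agree (out-of-range as `none`). -/
def MatchK (l : List Char) (a b k : Nat) : Prop := ∀ r < k, l[a + r]? = l[b + r]?

lemma matchK_symm {l : List Char} {a b k : Nat} (h : MatchK l a b k) : MatchK l b a k :=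
  fun r hr => (h r hr).symm

lemma matchK_take {l : List Char} {a b k : Nat} (h : MatchK l a b k) :
    (l.drop a).take k = (l.drop b).take k := by
  apply List.ext_getElem?
  intro q
  simp only [List.getElem?_take, List.getElem?_drop]
  split
  · exact h q ‹_›
  · rfl

lemma prefix_le {a b : List Char} (h : a <+: b) : a ≤ b := by
  obtain ⟨t, rfl⟩ := h
  cases t with
  | nil => simp
  | cons x xs => exact le_of_lt (by simpa using List.Lex.append_left (·<·) (List.Lex.nil) a)

/-- prefix-comparison: matching block then a strictly smaller character ⟹ lex-smaller suffix. -/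
lemma cmp_lt {l : List Char} {a b k : Nat} (hm : MatchK l a b k)
    (ha : a + k < l.length) (hb : b + k < l.length)
    (hlt : l[a + k] < l[b + k]) : l.drop a < l.drop b := by
  have h1 : l.drop a = (l.drop a).take k ++ l.drop (a + k) := by
    conv_lhs => rw [← List.take_append_drop k (l.drop a)]
    rw [List.drop_drop, Nat.add_comm]
  have h2 : l.drop b = (l.drop b).take k ++ l.drop (b + k) := by
    conv_lhs => rw [← List.take_append_drop k (l.drop b)]
    rw [List.drop_drop, Nat.add_comm]
  rw [h1, h2, ← matchK_take hm]
  show List.Lex _ _ _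
  apply List.Lex.append_left
  rw [List.drop_eq_getElem_cons ha, List.drop_eq_getElem_cons hb]
  exact List.Lex.rel hlt

/-- shifted comparison: every suffix inside the matched block inherits the strict comparison. -/
lemma shift_cmp {l : List Char} {a b k : Nat} (hm : MatchK l a b k)
    (ha : a + k < l.length) (hb : b + k < l.length)
    (hlt : l[a + k] < l[b + k]) : ∀ r ≤ k, l.drop (a + r) < l.drop (b + r) := by
  intro r hr
  have hm' : MatchK l (a + r) (b + r) (k - r) := by
    intro q hq
    have := hm (r + q) (by omega)
    rw [show a + r + q = a + (r + q) by omega, show b + r + q = b + (r + q) by omega]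
    exact this
  have hak : a + r + (k - r) = a + k := by omega
  have hbk : b + r + (k - r) = b + k := by omega
  apply cmp_lt hm' (by omega) (by omega)
  simp only [hak, hbk]
  exact hlt

/-- a matched block reaching the end of `l`: the suffix at `b` is a prefix of the suffix at `a`. -/
lemma tail_prefix_le {l : List Char} {a b : Nat} (_hab : a ≤ b) (_hb : b ≤ l.length)
    (hm : MatchK l a b (l.length - b)) : l.drop b ≤ l.drop a := by
  have hpre : l.drop b <+: l.drop a := by
    have h1 : l.drop b = (l.drop b).take (l.length - b) := by
      rw [List.take_of_length_le]
      simp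
    rw [h1, ← matchK_take hm]
    exact List.take_prefix _ _
  exact prefix_le hpre

lemma tail_prefix_lt {l : List Char} {a b : Nat} (hab : a < b) (hb : b < l.length)
    (hm : MatchK l a b (l.length - b)) : l.drop b < l.drop a := by
  apply lt_of_le_of_ne (tail_prefix_le (by omega) (by omega) hm)
  intro heq
  have := congrArg List.length heq
  simp [List.length_drop] at this
  omega

lemma nil_lt_drop {l : List Char} {a : Nat} (ha : a < l.length) :
    (List.drop l.length l : List Char) < l.drop a := by
  rw [List.drop_length]
  have : l.drop a ≠ [] := by
    simp [List.drop_eq_nil_iff]; omega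
  cases hd : l.drop a with
  | nil => exact absurd hd this
  | cons x xs => exact List.Lex.nil


-- ===== inner loop of A =====
lemma pvA_inner_spec (cs : List Char) (maxI curI : Nat) (hmc : maxI < curI) (i : Nat) :
    MatchK cs maxI curI i →
      MatchK cs maxI curI (pvA_inner cs maxI curI i) ∧
      (curI + i ≤ cs.length → curI + pvA_inner cs maxI curI i ≤ cs.length) ∧
      ¬(curI + pvA_inner cs maxI curI i < cs.length ∧
        cs.getD (maxI + pvA_inner cs maxI curI i) default
          = cs.getD (curI + pvA_inner cs maxI curI i) default) := by
  fun_induction pvA_inner with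
  | case1 i h ih =>
    intro hm
    have hm1 : MatchK cs maxI curI (i + 1) := by
      intro r hr
      rcases Nat.lt_or_ge r i with hri | hri
      · exact hm r hri
      · have hr' : r = i := by omega
        subst hr'
        have hc : curI + r < cs.length := h.1
        have hmx : maxI + r < cs.length := by omega
        rw [List.getD_eq_getElem _ default hmx, List.getD_eq_getElem _ default hc] at h
        simp [hc, hmx, h.2]
    obtain ⟨a, b, c⟩ := ih hm1
    exact ⟨a, fun _ => b (by omega), c⟩
  | case2 i h =>
    intro hm
    exact ⟨hm, fun hh => hh, h⟩

-- ===== outer loop of A =====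
lemma pvA_loop_spec (cs : List Char) (maxI curI : Nat) :
    maxI < curI → maxI ≤ cs.length →
      (∀ t < curI, cs.drop t ≤ cs.drop maxI) →
      pvA_loop cs maxI curI ≤ cs.length ∧
      ∀ t ≤ cs.length, cs.drop t ≤ cs.drop (pvA_loop cs maxI curI) := by
  fun_induction pvA_loop with
  | case1 maxI curI hcur i heq =>
    -- break: the suffix at curI matches the suffix at maxI up to the end of the string
    intro hmc hmn inv
    obtain ⟨hmK, _, _⟩ := pvA_inner_spec cs maxI curI hmc 0 (fun r hr => by omega)
    refine ⟨hmn, ?_⟩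
    intro t
    induction t using Nat.strong_induction_on with
    | _ t IH =>
      intro ht
      rcases Nat.lt_or_ge t curI with h1 | h1
      · exact inv t h1
      · have hd : maxI < curI := hmc
        have hm2 : MatchK cs (t - (curI - maxI)) t (cs.length - t) := by
          intro q hq
          have h3 := hmK (t - curI + q) (by omega)
          rw [show t - (curI - maxI) + q = maxI + (t - curI + q) by omega,
              show t + q = curI + (t - curI + q) by omega]
          exact h3
        have hle := tail_prefix_le (show t - (curI - maxI) ≤ t by omega) ht hm2
        rcases Nat.lt_or_ge (t - (curI - maxI)) curI with h2 | h2
        · exact le_trans hle (inv _ h2)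
        · exact le_trans hle (IH (t - (curI - maxI)) (by omega) (by omega))
  | case2 maxI curI hcur i hne hlt ih =>
    -- mismatch with s[maxI+i] < s[curI+i]: the candidate moves to curI
    intro hmc hmn inv
    obtain ⟨hmK, hile, hstop⟩ := pvA_inner_spec cs maxI curI hmc 0 (fun r hr => by omega)
    have hci : curI + i < cs.length := by
      have := hile (by omega)
      omega
    have hmi : maxI + i < cs.length := by omega
    rw [List.getD_eq_getElem _ default hmi, List.getD_eq_getElem _ default hci] at hlt
    have hmaxlt : cs.drop maxI < cs.drop curI := cmp_lt hmK hmi hci hlt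
    apply ih (by omega) (by omega)
    intro t htc
    rcases Nat.lt_or_ge t curI with h1 | h1
    · exact le_trans (inv t h1) (le_of_lt hmaxlt)
    · have : t = curI := by omega
      subst this
      exact le_refl _
  | case3 maxI curI hcur i hne hnlt ih =>
    -- mismatch with s[maxI+i] > s[curI+i]: the candidate stays
    intro hmc hmn inv
    obtain ⟨hmK, hile, hstop⟩ := pvA_inner_spec cs maxI curI hmc 0 (fun r hr => by omega)
    have hci : curI + i < cs.length := by
      have := hile (by omega)
      omega
    have hmi : maxI + i < cs.length := by omega
    have hcharne : cs.getD (maxI + i) default ≠ cs.getD (curI + i) default := by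
      intro hh
      exact hstop ⟨hci, hh⟩
    rw [List.getD_eq_getElem _ default hmi, List.getD_eq_getElem _ default hci] at hnlt hcharne
    have hgt : cs[curI + i] < cs[maxI + i] :=
      lt_of_le_of_ne (le_of_not_gt hnlt) (Ne.symm hcharne)
    have hcurlt : cs.drop curI < cs.drop maxI := cmp_lt (matchK_symm hmK) hci hmi hgt
    apply ih (by omega) hmn
    intro t htc
    rcases Nat.lt_or_ge t curI with h1 | h1
    · exact inv t h1
    · have : t = curI := by omega
      subst this
      exact le_of_lt hcurlt
  | case4 maxI curI hcur =>
    intro hmc hmn inv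
    refine ⟨hmn, ?_⟩
    intro t ht
    rcases Nat.lt_or_ge t curI with h1 | h1
    · exact inv t h1
    · have : t = cs.length := by omega
      subst this
      rw [List.drop_length]
      exact prefix_le (List.nil_prefix)

-- ===== loop of B =====
lemma pvB_loop_spec (cs : List Char) (i j k : Nat) :
    i < j → i ≤ cs.length → MatchK cs i j k →
      (∀ t ≤ cs.length, t ≠ i → t < j → ∃ u, u ≤ cs.length ∧ cs.drop t < cs.drop u) →
      pvB_loop cs i j k ≤ cs.length ∧
      ∀ t ≤ cs.length, t ≠ pvB_loop cs i j k →
        ∃ u, u ≤ cs.length ∧ cs.drop t < cs.drop u := by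
  fun_induction pvB_loop with
  | case1 i j k hjk heq ih =>
    -- matching characters: extend the match
    intro hij hin hmK dom
    have hikn : i + k < cs.length := by omega
    have hjkn : j + k < cs.length := hjk
    rw [List.getD_eq_getElem _ default hikn, List.getD_eq_getElem _ default hjkn] at heq
    apply ih hij hin ?_ dom
    intro r hr
    rcases Nat.lt_or_ge r k with hrk | hrk
    · exact hmK r hrk
    · have : r = k := by omega
      subst this
      simp [hikn, hjkn, heq]
  | case2 i j k hjk hne hlt i' ih =>
    -- s[i+k] < s[j+k]: every position in [i, i+k] ∪ {i} is beaten; candidate jumps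
    intro hij hin hmK dom
    have hikn : i + k < cs.length := by omega
    have hjkn : j + k < cs.length := hjk
    rw [List.getD_eq_getElem _ default hikn, List.getD_eq_getElem _ default hjkn] at hlt
    have hbeat : ∀ r ≤ k, cs.drop (i + r) < cs.drop (j + r) :=
      shift_cmp hmK hikn hjkn hlt
    apply ih (by omega) (by omega) (fun r hr => by omega)
    intro t ht htne htlt
    rcases Nat.lt_or_ge t j with h1 | h1
    · by_cases h2 : t = i
      · -- t = i is beaten by j
        subst h2
        exact ⟨j, by omega, by simpa using hbeat 0 (by omega)⟩
      · exact dom t ht h2 h1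
    · -- j ≤ t < max (i+k+1) j : only possible when t ≤ i + k; t = i + (t - i)
      have htik : t ≤ i + k := by omega
      refine ⟨j + (t - i), by omega, ?_⟩
      have := hbeat (t - i) (by omega)
      rwa [show i + (t - i) = t by omega] at this
  | case3 i j k hjk hne hnlt ih =>
    -- s[i+k] > s[j+k]: positions [j, j+k] are beaten; challenger jumps past them
    intro hij hin hmK dom
    have hikn : i + k < cs.length := by omega
    have hjkn : j + k < cs.length := hjk
    have hcharne : cs.getD (i + k) default ≠ cs.getD (j + k) default := hne
    rw [List.getD_eq_getElem _ default hikn, List.getD_eq_getElem _ default hjkn] at hnlt hcharne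
    have hgt : cs[j + k] < cs[i + k] :=
      lt_of_le_of_ne (le_of_not_gt hnlt) (Ne.symm hcharne)
    have hbeat : ∀ r ≤ k, cs.drop (j + r) < cs.drop (i + r) :=
      shift_cmp (matchK_symm hmK) hjkn hikn hgt
    apply ih (by omega) hin (fun r hr => by omega)
    intro t ht htne htlt
    rcases Nat.lt_or_ge t j with h1 | h1
    · exact dom t ht htne h1
    · refine ⟨i + (t - j), by omega, ?_⟩
      have := hbeat (t - j) (by omega)
      rwa [show j + (t - j) = t by omega] at this
  | case4 i j k hjk =>
    -- loop exit: j + k ≥ n; everything except i is beaten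
    intro hij hin hmK dom
    refine ⟨hin, ?_⟩
    intro t ht htne
    rcases Nat.lt_or_ge t j with h1 | h1
    · exact dom t ht htne h1
    · rcases Nat.lt_or_ge t cs.length with h2 | h2
      · -- j ≤ t < n: cs.drop t is a proper prefix of cs.drop (i + (t - j))
        have hm2 : MatchK cs (i + (t - j)) t (cs.length - t) := by
          intro q hq
          have h3 := hmK (t - j + q) (by omega)
          rw [show i + (t - j) + q = i + (t - j + q) by omega,
              show t + q = j + (t - j + q) by omega]
          exact h3
        exact ⟨i + (t - j), by omega, tail_prefix_lt (by omega) h2 hm2⟩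
      · have : t = cs.length := by omega
        subst this
        exact ⟨i, by omega, nil_lt_drop (by omega)⟩
-- ===== argmax =====
lemma isMax_of_dominated (cs : List Char) (m : Nat) (_hm : m ≤ cs.length)
    (h : ∀ t ≤ cs.length, t ≠ m → ∃ u, u ≤ cs.length ∧ cs.drop t < cs.drop u) :
    ∀ t ≤ cs.length, cs.drop t ≤ cs.drop m := by
  obtain ⟨b, hb, hmax⟩ := Finset.exists_max_image (Finset.range (cs.length + 1))
    (fun t => cs.drop t) ⟨0, by simp⟩
  simp only [Finset.mem_range] at hb
  have hbm : b = m := by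
    by_contra hne
    obtain ⟨u, hu, hlt⟩ := h b (by omega) hne
    exact absurd (hmax u (by simp; omega)) (by simp [not_le]; exact hlt)
  intro t ht
  have := hmax t (by simp; omega)
  rwa [hbm] at this

-- ===== VERDICT (by name: the statement is the Claim_ definition above) =====
theorem lastSubstring_spec : Claim_equal_lastSubstring := by
  intro s _hd
  show lastSubstring s = lastSubstring_alt s
  obtain ⟨hA1, hA2⟩ := pvA_loop_spec s.toList 0 1 (by omega) (Nat.zero_le _)
    (fun t ht => by
      have h0 : t = 0 := by omega
      subst h0
      exact le_refl _)
  obtain ⟨hB1, hB2⟩ := pvB_loop_spec s.toList 0 1 0 (by omega) (Nat.zero_le _)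
    (fun r hr => by omega) (fun t ht htne htlt => by omega)
  have hBmax := isMax_of_dominated s.toList _ hB1 hB2
  have h1 : s.toList.drop (pvA_loop s.toList 0 1) = s.toList.drop (pvB_loop s.toList 0 1 0) :=
    le_antisymm (hBmax _ hA1) (hA2 _ hB1)
  simp [lastSubstring, lastSubstring_alt, PySem.Str.slice, PySem.Chars.slice_eq_listSlice,
    PySem.List.slice_from_natCast, h1]
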